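-- pv_equiv track=rewrite | github.com/kai-pham/Python2_Spring2026 | bagcoins_PHAM_HUY_THANG.py | tally_coin
-- ===== SOURCE A (Python) =====
-- QUARTER_SIZE = 24
--
-- DIME_SIZE = 18
--
-- NICKEL_SIZE = 21
--
-- PENNY_SIZE = 19
--
-- def tally_coin(coin_bag):
--     """
--     Tally the coins by its denomination using a for loop.
--     Returns: q, d, n, p, f - the count of quarters, dimes, nickels, pennies, and foreign coins respectively.
--     """
--     q = d = n = p = f = 0
--     for coin in coin_bag:
--         if coin == QUARTER_SIZE:
--             q += 1
--         elif coin == DIME_SIZE: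
--             d += 1
--         elif coin == NICKEL_SIZE:
--             n += 1
--         elif coin == PENNY_SIZE:
--             p += 1
--         else:
--             f += 1
--     return q, d, n, p, f
-- ===== SOURCE B (Python) =====
-- QUARTER_SIZE = 24
-- DIME_SIZE = 18
-- NICKEL_SIZE = 21
-- PENNY_SIZE = 19
--
-- def tally_coin(coin_bag):
--     coins = list(coin_bag)
--     q = coins.count(QUARTER_SIZE)
--     d = coins.count(DIME_SIZE)
--     n = coins.count(NICKEL_SIZE)
--     p = coins.count(PENNY_SIZE)
--     return q, d, n, p, len(coins) - q - d - n - p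
-- ===== Notes on version B (the rewrite author's own statement) =====
-- stated objective: idiomatic
-- what changed: Replaces the single five-way branching accumulator loop with staged passes: one list.count per denomination and the foreign count by subtraction from the length, with no per-element branching.
import Mathlib
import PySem

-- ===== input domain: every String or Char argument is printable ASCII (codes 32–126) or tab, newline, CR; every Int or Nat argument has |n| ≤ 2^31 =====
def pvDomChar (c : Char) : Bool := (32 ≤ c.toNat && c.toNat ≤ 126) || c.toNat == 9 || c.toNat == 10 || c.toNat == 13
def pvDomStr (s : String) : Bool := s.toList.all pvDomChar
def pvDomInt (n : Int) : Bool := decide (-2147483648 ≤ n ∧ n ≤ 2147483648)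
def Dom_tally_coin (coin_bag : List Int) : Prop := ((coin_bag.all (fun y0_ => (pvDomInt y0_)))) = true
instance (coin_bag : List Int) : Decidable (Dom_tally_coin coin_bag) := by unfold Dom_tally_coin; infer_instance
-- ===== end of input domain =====

-- B replaces A's five-way branching loop with staged list.count passes and a length subtraction (idiomatic; same cost).

-- ===== PORT A =====
def QUARTER_SIZE : Int := 24
def DIME_SIZE : Int := 18
def NICKEL_SIZE : Int := 21
def PENNY_SIZE : Int := 19

def tally_coin (coin_bag : List Int) : Int × Int × Int × Int × Int :=
  let st := coin_bag.foldl (fun (st : Int × Int × Int × Int × Int) coin =>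
    let (q, d, n, p, f) := st
    if coin = QUARTER_SIZE then (q + 1, d, n, p, f)
    else if coin = DIME_SIZE then (q, d + 1, n, p, f)
    else if coin = NICKEL_SIZE then (q, d, n + 1, p, f)
    else if coin = PENNY_SIZE then (q, d, n, p + 1, f)
    else (q, d, n, p, f + 1)) (0, 0, 0, 0, 0)
  st

-- ===== PORT B =====
def tally_coin_alt (coin_bag : List Int) : Int × Int × Int × Int × Int :=
  let coins := coin_bag
  let q : Int := PySem.List.count coins QUARTER_SIZE
  let d : Int := PySem.List.count coins DIME_SIZE
  let n : Int := PySem.List.count coins NICKEL_SIZE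
  let p : Int := PySem.List.count coins PENNY_SIZE
  (q, d, n, p, (coins.length : Int) - q - d - n - p)

-- ===== PRECONDITION & SPEC =====
def Spec_tally_coin (coin_bag : List Int) (out : Int × Int × Int × Int × Int) : Prop := out = tally_coin_alt coin_bag
instance (coin_bag : List Int) (out : Int × Int × Int × Int × Int) : Decidable (Spec_tally_coin coin_bag out) := by unfold Spec_tally_coin; infer_instance

-- ===== CLAIM =====
def Claim_equal_tally_coin : Prop := ∀ (coin_bag : List Int), Dom_tally_coin coin_bag → Spec_tally_coin coin_bag (tally_coin coin_bag)

-- ===== LEMMAS AND PROOFS =====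
theorem tally_foldl (xs : List Int) (q d n p f : Int) :
    xs.foldl (fun (st : Int × Int × Int × Int × Int) coin =>
      let (q, d, n, p, f) := st
      if coin = QUARTER_SIZE then (q + 1, d, n, p, f)
      else if coin = DIME_SIZE then (q, d + 1, n, p, f)
      else if coin = NICKEL_SIZE then (q, d, n + 1, p, f)
      else if coin = PENNY_SIZE then (q, d, n, p + 1, f)
      else (q, d, n, p, f + 1)) (q, d, n, p, f)
    = (q + xs.count 24, d + xs.count 18, n + xs.count 21, p + xs.count 19,
       f + (xs.length - xs.count 24 - xs.count 18 - xs.count 21 - xs.count 19)) := by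
  induction xs generalizing q d n p f with
  | nil => simp
  | cons c xs ih =>
    simp only [List.foldl_cons, List.count_cons, List.length_cons]
    by_cases h24 : c = 24
    · subst h24; rw [ih]; simp [QUARTER_SIZE, Prod.mk.injEq]; omega
    · by_cases h18 : c = 18
      · subst h18; rw [ih]; simp [QUARTER_SIZE, DIME_SIZE]; omega
      · by_cases h21 : c = 21
        · subst h21; rw [ih]; simp [QUARTER_SIZE, DIME_SIZE, NICKEL_SIZE]; omega
        · by_cases h19 : c = 19
          · subst h19; rw [ih]; simp [QUARTER_SIZE, DIME_SIZE, NICKEL_SIZE, PENNY_SIZE]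
            omega
          · rw [show ((if c = QUARTER_SIZE then (q + 1, d, n, p, f)
              else if c = DIME_SIZE then (q, d + 1, n, p, f)
              else if c = NICKEL_SIZE then (q, d, n + 1, p, f)
              else if c = PENNY_SIZE then (q, d, n, p + 1, f)
              else (q, d, n, p, f + 1)) = (q, d, n, p, f + 1)) from by
                simp [QUARTER_SIZE, DIME_SIZE, NICKEL_SIZE, PENNY_SIZE, h24, h18, h21, h19]]
            rw [ih]
            simp [h24, h18, h21, h19]; omega

-- ===== VERDICT =====
theorem tally_coin_spec : Claim_equal_tally_coin := by
  intro xs _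
  unfold Spec_tally_coin tally_coin tally_coin_alt
  simp only []
  rw [tally_foldl]
  simp [PySem.List.count_eq, QUARTER_SIZE, DIME_SIZE, NICKEL_SIZE, PENNY_SIZE]
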